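-- pv_equiv track=rewrite | github.com/wdebruin7/hw3 | HTTPServer.py | validHTTPVersion
-- ===== SOURCE A (Python) =====
-- def validHTTPVersion(token):
--     #pdb.set_trace()
--     arr = token.split('/')
--     if len(arr) != 2 or arr[0] != 'HTTP': return -2
--     arr = arr[1].split('.')
--     if len(arr) != 2: return -2
--     for elt in arr:
--         for char in elt:
--             if char not in '1234567890': return -2
--     return 0
-- ===== SOURCE B (Python) =====
-- def validHTTPVersion(token):
--     # single left-to-right scan: fixed prefix, then digits with exactly one dot
--     if not token.startswith('HTTP/'):
--         return -2
--     seen_dot = False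
--     for ch in token[5:]:
--         if ch == '.':
--             if seen_dot:
--                 return -2
--             seen_dot = True
--         elif not ('0' <= ch <= '9'):
--             return -2
--     return 0 if seen_dot else -2
-- ===== Notes on version B (the rewrite author's own statement) =====
-- stated objective: simpler
-- what changed: Replaces the two split() calls and nested char loops with a single left-to-right scan: check the fixed prefix 'HTTP/', then walk the rest once requiring digits and exactly one '.'.
import Mathlib
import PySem

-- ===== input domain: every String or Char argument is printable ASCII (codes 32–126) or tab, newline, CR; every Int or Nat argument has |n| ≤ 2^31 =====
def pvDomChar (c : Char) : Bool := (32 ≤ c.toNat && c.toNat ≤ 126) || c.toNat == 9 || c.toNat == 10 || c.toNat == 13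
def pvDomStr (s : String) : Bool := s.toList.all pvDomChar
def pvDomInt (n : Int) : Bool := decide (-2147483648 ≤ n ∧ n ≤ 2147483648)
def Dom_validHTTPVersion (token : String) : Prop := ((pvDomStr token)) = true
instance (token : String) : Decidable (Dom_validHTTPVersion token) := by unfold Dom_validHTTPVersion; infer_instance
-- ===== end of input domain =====

-- B replaces A's two split() passes and nested char loops with a single left-to-right scan:
-- fixed-prefix check for 'HTTP/', then one pass over the rest requiring digits and exactly one '.'.


-- ===== PORT A =====
-- literal port of A: split on '/', check shape and 'HTTP', split on '.', check shape, then the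
-- nested for-loops (early return -2 on any non-digit char, else fall through to 0) become .all checks
def validHTTPVersion (token : String) : Int :=
  let arr := PySem.Chars.splitOn token.toList ['/']
  if arr.length ≠ 2 ∨ arr.getD 0 [] ≠ "HTTP".toList then -2
  else
    let arr2 := PySem.Chars.splitOn (arr.getD 1 []) ['.']
    if arr2.length ≠ 2 then -2
    else if arr2.all (fun elt => elt.all (fun c => ("1234567890".toList).contains c)) then 0
    else -2

-- ===== PORT B =====
-- the for-loop of Source B with its seen_dot flag and early returns ('0' <= ch <= '9' is
-- PySem.Chars.isdigit, exactly Source B's test)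
def altScan : Bool → List Char → Int
  | seen, [] => if seen then 0 else -2
  | seen, c :: rest =>
      if c = '.' then
        if seen then -2 else altScan true rest
      else if PySem.Chars.isdigit c then altScan seen rest
      else -2

def validHTTPVersion_alt (token : String) : Int :=
  if PySem.Chars.startswith token.toList "HTTP/".toList then
    altScan false (PySem.Chars.slice token.toList (some 5) none)
  else -2

-- ===== PRECONDITION & SPEC =====
def Spec_validHTTPVersion (token : String) (out : Int) : Prop := out = validHTTPVersion_alt token
instance (token : String) (out : Int) : Decidable (Spec_validHTTPVersion token out) := by unfold Spec_validHTTPVersion; infer_instance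

-- ===== CLAIM (what is proved, stated in full; the proofs are below) =====
def Claim_equal_validHTTPVersion : Prop := ∀ (token : String), Dom_validHTTPVersion token → Spec_validHTTPVersion token (validHTTPVersion token)

-- ===== LEMMAS AND PROOFS =====

-- a fuel-free model of PySem.Chars.splitOn on a single-character separator
def parts (sep : Char) : List Char → List (List Char)
  | [] => [[]]
  | c :: rest =>
      if c = sep then [] :: parts sep rest
      else
        match parts sep rest with
        | [] => [[c]]
        | p :: ps => (c :: p) :: ps

lemma parts_ne_nil (sep : Char) (l : List Char) : parts sep l ≠ [] := by
  induction l with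
  | nil => simp [parts]
  | cons c rest ih =>
      simp only [parts]
      split
      · simp
      · split <;> simp

lemma parts_singleton_iff (sep : Char) (l x : List Char) :
    parts sep l = [x] ↔ x = l ∧ sep ∉ l := by
  induction l generalizing x with
  | nil => simp [parts]
  | cons c rest ih =>
      simp only [parts]
      by_cases hc : c = sep
      · subst hc
        simp only [if_pos rfl]
        constructor
        · intro h
          rcases hp : parts c rest with _ | ⟨p, ps⟩
          · exact absurd hp (parts_ne_nil c rest)
          · rw [hp] at h; simp at h
        · rintro ⟨rfl, h⟩; simp at h
      · simp only [if_neg hc]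
        rcases hp : parts sep rest with _ | ⟨p, ps⟩
        · exact absurd hp (parts_ne_nil sep rest)
        · simp only []
          constructor
          · intro h
            obtain ⟨h1, h2⟩ := by simpa using h
            have hpr : p = rest ∧ sep ∉ rest := (ih p).mp (by rw [hp, h2])
            constructor
            · rw [← h1, hpr.1]
            · simp only [List.mem_cons, not_or]
              exact ⟨fun h' => hc h'.symm, hpr.2⟩
          · rintro ⟨rfl, hmem⟩
            have hrest : sep ∉ rest := fun h => hmem (List.mem_cons_of_mem _ h)
            have := (ih rest).mpr ⟨rfl, hrest⟩
            rw [hp] at this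
            obtain ⟨h1, h2⟩ := by simpa using this
            simp [h1, h2]

lemma parts_pair_iff (sep : Char) (l a b : List Char) :
    parts sep l = [a, b] ↔ l = a ++ sep :: b ∧ sep ∉ a ∧ sep ∉ b := by
  induction l generalizing a with
  | nil =>
      simp only [parts]
      constructor
      · intro h; simp at h
      · rintro ⟨h, -⟩; exact absurd h (by simp)
  | cons c rest ih =>
      simp only [parts]
      by_cases hc : c = sep
      · subst hc
        simp only [if_pos rfl]
        constructor
        · intro h
          obtain ⟨h1, h2⟩ : ([] : List Char) = a ∧ parts c rest = [b] := by simpa using h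
          obtain ⟨rfl, hmem⟩ := (parts_singleton_iff c rest b).mp h2
          subst h1
          simp [hmem]
        · rintro ⟨heq, hna, hnb⟩
          cases a with
          | cons x xs =>
              injection heq with hcx _
              exact absurd (hcx ▸ List.mem_cons_self) hna
          | nil =>
              simp only [List.nil_append] at heq
              injection heq with _ hrb
              subst hrb
              simp [(parts_singleton_iff c rest rest).mpr ⟨rfl, hnb⟩]
      · simp only [if_neg hc]
        rcases hp : parts sep rest with _ | ⟨p, ps⟩
        · exact absurd hp (parts_ne_nil sep rest)
        · constructor
          · intro h
            obtain ⟨h1, h2⟩ := by simpa using h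
            have hr : rest = p ++ sep :: b ∧ sep ∉ p ∧ sep ∉ b := (ih p).mp (by rw [hp, h2])
            refine ⟨by rw [← h1]; simp [hr.1], ?_, hr.2.2⟩
            rw [← h1]
            simp only [List.mem_cons, not_or]
            exact ⟨fun h' => hc h'.symm, hr.2.1⟩
          · rintro ⟨heq, hna, hnb⟩
            cases a with
            | nil => simp at heq; exact absurd heq.1 hc
            | cons x xs =>
                simp only [List.cons_append, List.cons.injEq] at heq
                obtain ⟨rfl, hrest⟩ := heq
                have hna' : sep ∉ xs := fun h => hna (List.mem_cons_of_mem _ h)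
                have := (ih xs).mpr ⟨hrest, hna', hnb⟩
                rw [hp] at this
                obtain ⟨h1, h2⟩ := by simpa using this
                simp [h1, h2]

def consHead (x : List Char) : List (List Char) → List (List Char)
  | [] => [x]
  | p :: ps => (x ++ p) :: ps

lemma go_closed (sep : Char) (fuel : Nat) :
    ∀ l cur acc, l.length ≤ fuel →
      PySem.Chars.splitOn.go [sep] fuel l cur acc =
        acc.reverse ++ consHead cur.reverse (parts sep l) := by
  induction fuel with
  | zero =>
      intro l cur acc h
      have : l = [] := List.length_eq_zero_iff.mp (Nat.le_zero.mp h)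
      subst this
      simp [PySem.Chars.splitOn.go, parts, consHead]
  | succ n ih =>
      intro l cur acc h
      cases l with
      | nil => simp [PySem.Chars.splitOn.go, parts, consHead]
      | cons c rest =>
          rw [PySem.Chars.splitOn.go]
          by_cases hc : c = sep
          · subst hc
            have hpre : [c].isPrefixOf (c :: rest) = true := by simp [List.isPrefixOf]
            simp only [hpre, if_pos]
            have hlen : rest.length ≤ n := by simpa using h
            rw [show List.drop [c].length (c :: rest) = rest by simp]
            rw [ih rest [] (cur.reverse :: acc) hlen]
            simp only [parts, if_pos rfl]
            rcases hp : parts c rest with _ | ⟨p, ps⟩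
            · exact absurd hp (parts_ne_nil c rest)
            · simp [consHead]
          · have hpre : [sep].isPrefixOf (c :: rest) = false := by
              simp only [List.isPrefixOf, Bool.and_eq_false_iff]
              left
              simp [beq_eq_false_iff_ne]
              exact fun h' => hc h'.symm
            simp only [hpre, Bool.false_eq_true, if_false]
            have hlen : rest.length ≤ n := by simpa using h
            rw [ih rest (c :: cur) acc hlen]
            simp only [parts, if_neg hc]
            rcases hp : parts sep rest with _ | ⟨p, ps⟩
            · exact absurd hp (parts_ne_nil sep rest)
            · simp [consHead]

lemma splitOn_eq_parts (sep : Char) (l : List Char) :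
    PySem.Chars.splitOn l [sep] = parts sep l := by
  unfold PySem.Chars.splitOn
  rw [go_closed sep (l.length + 1) l [] [] (by omega)]
  rcases hp : parts sep l with _ | ⟨p, ps⟩
  · exact absurd hp (parts_ne_nil sep l)
  · simp [consHead]

-- digit-character bridge: A's membership test equals Source B's isdigit test
lemma contains_digits_eq (c : Char) :
    (("1234567890".toList).contains c) = PySem.Chars.isdigit c := by
  have eqc : ∀ d : Char, (c = d) ↔ c.toNat = d.toNat :=
    fun d => ⟨fun h => by rw [h], fun h => Char.ext (UInt32.toNat_inj.mp h)⟩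
  have : (("1234567890".toList).contains c = true) ↔ (PySem.Chars.isdigit c = true) := by
    simp [PySem.Chars.isdigit, eqc, Char.le_def, UInt32.le_iff_toNat_le,
      show ('1':Char).toNat = 49 from rfl, show ('2':Char).toNat = 50 from rfl,
      show ('3':Char).toNat = 51 from rfl, show ('4':Char).toNat = 52 from rfl,
      show ('5':Char).toNat = 53 from rfl, show ('6':Char).toNat = 54 from rfl,
      show ('7':Char).toNat = 55 from rfl, show ('8':Char).toNat = 56 from rfl,
      show ('9':Char).toNat = 57 from rfl, show ('0':Char).toNat = 48 from rfl]
    constructor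
    · rintro (h|h|h|h|h|h|h|h|h|h) <;> omega
    · intro h; omega
  exact Bool.eq_iff_iff.mpr (by simpa using this)

lemma isdigit_ne (c : Char) (h : PySem.Chars.isdigit c = true) : c ≠ '/' ∧ c ≠ '.' := by
  simp only [PySem.Chars.isdigit, Bool.and_eq_true, decide_eq_true_eq, Char.le_def,
    UInt32.le_iff_toNat_le] at h
  constructor <;> (intro h'; subst h'; revert h; decide)

-- both programs return 0 exactly on "HTTP/" ++ digits ++ "." ++ digits, else -2
def OkP (cs : List Char) : Prop :=
  ∃ x y, cs = "HTTP/".toList ++ x ++ '.' :: y ∧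
    x.all PySem.Chars.isdigit = true ∧ y.all PySem.Chars.isdigit = true

lemma altScan_true (l : List Char) :
    altScan true l = if l.all PySem.Chars.isdigit then 0 else -2 := by
  induction l with
  | nil => simp [altScan]
  | cons c rest ih =>
      by_cases hc : c = '.'
      · subst hc
        simp [altScan, PySem.Chars.isdigit]
      · simp only [altScan, if_neg hc]
        by_cases hd : PySem.Chars.isdigit c
        · simp [hd, ih]
        · simp [hd]

lemma altScan_false_zero (l : List Char) :
    altScan false l = 0 ↔
      ∃ x y, l = x ++ '.' :: y ∧ x.all PySem.Chars.isdigit = true ∧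
        y.all PySem.Chars.isdigit = true := by
  induction l with
  | nil =>
      simp [altScan]
  | cons c rest ih =>
      by_cases hc : c = '.'
      · subst hc
        simp only [altScan, if_pos rfl, if_neg (by simp : ¬(false = true)), altScan_true]
        constructor
        · intro h
          have hall : rest.all PySem.Chars.isdigit = true := by
            by_contra hno
            simp [hno] at h
          exact ⟨[], rest, by simp, by simp, hall⟩
        · rintro ⟨x, y, heq, hx, hy⟩
          cases x with
          | nil =>
              simp at heq
              subst heq
              simp [hy]
          | cons d ds =>
              injection heq with h1 _
              have := (isdigit_ne d (by simp only [List.all_cons, Bool.and_eq_true] at hx; exact hx.1)).2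
              exact absurd h1.symm this
      · simp only [altScan, if_neg hc]
        by_cases hd : PySem.Chars.isdigit c
        · rw [if_pos hd, ih]
          constructor
          · rintro ⟨x, y, heq, hx, hy⟩
            exact ⟨c :: x, y, by simp [heq], by simp [hd, hx], hy⟩
          · rintro ⟨x, y, heq, hx, hy⟩
            cases x with
            | nil => simp at heq; exact absurd heq.1 hc
            | cons d ds =>
                injection heq with h1 h2
                subst h1
                exact ⟨ds, y, h2, by simp only [List.all_cons, Bool.and_eq_true] at hx; exact hx.2, hy⟩
        · rw [if_neg hd]
          constructor
          · intro h; simp at h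
          · rintro ⟨x, y, heq, hx, hy⟩
            cases x with
            | nil => simp at heq; exact absurd heq.1 hc
            | cons d ds =>
                injection heq with h1 _
                subst h1
                simp at hx
                exact absurd hx.1 hd

lemma altScan_vals (seen : Bool) (l : List Char) :
    altScan seen l = 0 ∨ altScan seen l = -2 := by
  induction l generalizing seen with
  | nil => cases seen <;> simp [altScan]
  | cons c rest ih =>
      simp only [altScan]
      split_ifs <;> first | simp | exact ih _ | exact ih _

lemma B_zero_iff (token : String) :
    validHTTPVersion_alt token = 0 ↔ OkP token.toList := by
  unfold validHTTPVersion_alt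
  by_cases hs : PySem.Chars.startswith token.toList "HTTP/".toList = true
  · simp only [hs, if_pos]
    obtain ⟨t, ht⟩ := (PySem.Chars.startswith_iff _ _).mp hs
    have hslice : PySem.Chars.slice token.toList (some 5) none = t := by
      rw [PySem.Chars.slice_eq_listSlice, PySem.List.slice_from token.toList (by norm_num : (0:Int) ≤ 5)]
      rw [← ht]
      simp
    rw [hslice, altScan_false_zero]
    unfold OkP
    constructor
    · rintro ⟨x, y, rfl, hx, hy⟩
      exact ⟨x, y, by rw [← ht]; simp, hx, hy⟩
    · rintro ⟨x, y, heq, hx, hy⟩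
      refine ⟨x, y, ?_, hx, hy⟩
      rw [← ht] at heq
      simpa using heq
  · simp only [Bool.not_eq_true] at hs
    simp only [hs, Bool.false_eq_true, if_false]
    constructor
    · intro h; simp at h
    · rintro ⟨x, y, heq, hx, hy⟩
      rw [heq] at hs
      have : PySem.Chars.startswith ("HTTP/".toList ++ x ++ '.' :: y) "HTTP/".toList = true :=
        (PySem.Chars.startswith_iff _ _).mpr ⟨x ++ '.' :: y, by simp⟩
      rw [this] at hs
      simp at hs

lemma B_vals (token : String) :
    validHTTPVersion_alt token = 0 ∨ validHTTPVersion_alt token = -2 := by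
  unfold validHTTPVersion_alt
  split_ifs
  · exact altScan_vals false _
  · simp

lemma A_zero_iff (token : String) :
    validHTTPVersion token = 0 ↔ OkP token.toList := by
  unfold validHTTPVersion
  simp only [splitOn_eq_parts]
  constructor
  · intro h
    split_ifs at h with h1 h2 h3
    all_goals try simp at h
    rw [not_or, not_ne_iff, not_ne_iff] at h1
    obtain ⟨hl, hget⟩ := h1
    obtain ⟨a, b, hab⟩ := List.length_eq_two.mp hl
    rw [hab] at hget h2 h3
    simp only [List.getD] at hget h2 h3
    obtain ⟨x, y, hxy⟩ := List.length_eq_two.mp (not_ne_iff.mp h2)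
    rw [hxy] at h3
    have hsplit1 := (parts_pair_iff '/' token.toList a b).mp hab
    have hsplit2 := (parts_pair_iff '.' _ x y).mp (by simpa using hxy)
    simp only [List.all_cons, List.all_nil, Bool.and_true, Bool.and_eq_true] at h3
    simp only [contains_digits_eq] at h3
    refine ⟨x, y, ?_, h3.1, h3.2⟩
    rw [hsplit1.1]
    have hb : b = x ++ '.' :: y := by simpa using hsplit2.1
    rw [hb]
    have ha : a = "HTTP".toList := by simpa using hget
    rw [ha]
    rfl
  · rintro ⟨x, y, heq, hx, hy⟩
    have hx' : '/' ∉ x := fun hm => (isdigit_ne _ (by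
      rw [List.all_eq_true] at hx; exact hx _ hm)).1 rfl
    have hy' : '/' ∉ y := fun hm => (isdigit_ne _ (by
      rw [List.all_eq_true] at hy; exact hy _ hm)).1 rfl
    have hxd : '.' ∉ x := fun hm => (isdigit_ne _ (by
      rw [List.all_eq_true] at hx; exact hx _ hm)).2 rfl
    have hyd : '.' ∉ y := fun hm => (isdigit_ne _ (by
      rw [List.all_eq_true] at hy; exact hy _ hm)).2 rfl
    have hp1 : parts '/' token.toList = ["HTTP".toList, x ++ '.' :: y] := by
      apply (parts_pair_iff _ _ _ _).mpr
      refine ⟨by rw [heq]; rfl, by decide, ?_⟩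
      simp only [List.mem_append, List.mem_cons, not_or]
      exact ⟨hx', by decide, hy'⟩
    have hp2 : parts '.' (x ++ '.' :: y) = [x, y] :=
      (parts_pair_iff _ _ _ _).mpr ⟨rfl, hxd, hyd⟩
    simp only [hp1, List.getD_cons_zero, List.getD_cons_succ, List.length_cons,
      List.length_nil]
    rw [if_neg (by norm_num)]
    simp only [hp2, List.length_cons, List.length_nil]
    rw [if_neg (by norm_num)]
    rw [if_pos ?_]
    simp only [List.all_cons, List.all_nil, contains_digits_eq, Bool.and_true, Bool.and_eq_true]
    exact ⟨hx, hy⟩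

lemma A_vals (token : String) :
    validHTTPVersion token = 0 ∨ validHTTPVersion token = -2 := by
  unfold validHTTPVersion
  simp only [splitOn_eq_parts]
  split_ifs <;> simp

-- ===== VERDICT (by name: the statement is the Claim_ definition above) =====
theorem validHTTPVersion_spec : Claim_equal_validHTTPVersion := by
  intro token _
  unfold Spec_validHTTPVersion
  by_cases hok : OkP token.toList
  · rw [(A_zero_iff token).mpr hok, (B_zero_iff token).mpr hok]
  · rcases A_vals token with h | h <;> rcases B_vals token with h' | h'
    · rw [h, h']
    · exact absurd ((A_zero_iff token).mp h) hok
    · exact absurd ((B_zero_iff token).mp h') hok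
    · rw [h, h']
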